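-- pv_equiv track=rewrite | github.com/glebmavi/ITMO | 4-Алгоритмы и структуры данных/Codeforces/B_ShovelSale.py | shovel_sale
-- ===== SOURCE A (Python) =====
-- def shovel_sale(n):
--     pairs = 0
--     summ = n + (n - 1)
--     if summ < 9:
--         return n * (n - 1) // 2
--     if set(str(summ)) <= {'9'}:
--         return 1
--     else:
--         length = len(str(summ))
--         cur = (length - 1) * '9'
--         possible_summs = [int(f'{i}{cur}') for i in range(9) if int(f'{i}{cur}') <= summ]
--         for p in possible_summs:
--             if p <= n + 1:
--                 pairs += p//2
--             else:
--                 pairs += (n - (p - n) + 1)//2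
--         return pairs
-- ===== SOURCE B (Python) =====
-- def shovel_sale(n):
--     # Closed-form counting: instead of enumerating candidate sums, compute how many
--     # qualifying sums there are and count all their pairs at once with Gauss
--     # (triangular-number) formulas; only the power of ten is found by a loop.
--     s = 2 * n - 1
--     if s < 9:
--         return n * (n - 1) // 2
--     p = 10
--     while 10 * p - 1 <= s:
--         p *= 10
--     m = (s + 1) // p            # qualifying sums are j*p - 1 for j = 1..m
--     m1 = min(m, (n + 2) // p)   # among them, the sums t with t <= n + 1
--     h = p // 2
--     t1 = m1 * (m1 + 1) // 2
--     t = m * (m + 1) // 2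
--     return h * t1 - m1 + (m - m1) * (n + 1) - h * (t - t1)
-- ===== Notes on version B (the rewrite author's own statement) =====
-- stated objective: alternative
-- what changed: B replaces A's enumerate-and-accumulate scheme (build up to nine candidate sums as digit strings, parse them back to ints, filter, then loop over them adding a two-branch per-candidate pair count) by a closed-form computation: it derives the number m of qualifying sums and the split point m1 by two integer divisions and counts all pairs of all candidates at once with triangular-number (Gauss) formulas, so there is no candidate list, no per-candidate loop and no string work at all; only the relevant power of ten is found by a short multiplicative loop.
import Mathlib
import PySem

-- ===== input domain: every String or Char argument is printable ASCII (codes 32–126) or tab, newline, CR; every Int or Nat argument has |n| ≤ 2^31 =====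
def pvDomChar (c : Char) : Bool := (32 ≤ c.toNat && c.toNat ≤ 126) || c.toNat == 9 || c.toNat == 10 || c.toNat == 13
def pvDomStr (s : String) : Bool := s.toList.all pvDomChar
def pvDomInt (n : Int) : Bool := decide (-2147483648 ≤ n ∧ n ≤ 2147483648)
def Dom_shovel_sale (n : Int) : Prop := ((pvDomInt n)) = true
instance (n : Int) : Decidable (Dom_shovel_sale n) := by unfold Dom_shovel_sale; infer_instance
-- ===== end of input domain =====

-- B drops A's candidate enumeration entirely: no digit strings, no candidate list, no
-- per-candidate loop — the number of qualifying sums and the split point come from two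
-- integer divisions and all pairs are counted at once by triangular-number formulas.

-- ===== PORT A =====
def shovel_sale (n : Int) : Int :=
  let summ := n + (n - 1)
  if summ < 9 then PySem.Int.floordiv (n * (n - 1)) 2
  else if PySem.Set.issubset (PySem.Set.ofList (PySem.Int.toChars summ)) (PySem.Set.ofList ['9']) then 1
  else
    let length := PySem.List.len (PySem.Int.toChars summ)
    let cur := PySem.List.pyRepeat ['9'] (length - 1)
    -- int(f'{i}{cur}') always parses (a digit string), so .getD 0 is never the default
    let possible_summs :=
      ((PySem.List.pyRange 0 9).map
        (fun i => (PySem.Int.ofChars? (PySem.Int.toChars i ++ cur)).getD 0)).filter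
        (fun v => decide (v ≤ summ))
    possible_summs.foldl
      (fun pairs p =>
        if p ≤ n + 1 then pairs + PySem.Int.floordiv p 2
        else pairs + PySem.Int.floordiv (n - (p - n) + 1) 2) 0

-- ===== PORT B =====
-- while 10*p - 1 <= s: p *= 10   (the 0 < p conjunct only makes the recursion total;
-- it always holds on B's calls, which start at p = 10)
def pvPowLoop (s p : Int) : Int :=
  if h : 0 < p ∧ 10 * p - 1 ≤ s then pvPowLoop s (10 * p) else p
termination_by (s + 1 - p).toNat
decreasing_by omega

def shovel_sale_alt (n : Int) : Int :=
  let s := 2 * n - 1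
  if s < 9 then PySem.Int.floordiv (n * (n - 1)) 2
  else
    let p := pvPowLoop s 10
    let m := PySem.Int.floordiv (s + 1) p
    let m1 := min m (PySem.Int.floordiv (n + 2) p)
    let h := PySem.Int.floordiv p 2
    let t1 := PySem.Int.floordiv (m1 * (m1 + 1)) 2
    let t := PySem.Int.floordiv (m * (m + 1)) 2
    h * t1 - m1 + (m - m1) * (n + 1) - h * (t - t1)

-- ===== PRECONDITION & SPEC =====
def Spec_shovel_sale (n : Int) (out : Int) : Prop := out = shovel_sale_alt n
instance (n : Int) (out : Int) : Decidable (Spec_shovel_sale n out) := by unfold Spec_shovel_sale; infer_instance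

-- ===== CLAIM (what is proved, stated in full; the proofs are below) =====
def Claim_equal_shovel_sale : Prop := ∀ (n : Int), Dom_shovel_sale n → Spec_shovel_sale n (shovel_sale n)

-- ===== LEMMAS AND PROOFS =====

def pvRep (m : Nat) : List Char :=
  if m < 10 then [Nat.digitChar m] else pvRep (m / 10) ++ [Nat.digitChar (m % 10)]
decreasing_by exact Nat.div_lt_self (by omega) (by omega)

theorem pvRep_toDigitsCore : ∀ (f m : Nat), m < f → ∀ (acc : List Char),
    Nat.toDigitsCore 10 f m acc = pvRep m ++ acc := by
  intro f
  induction f with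
  | zero => omega
  | succ f ih =>
    intro m hm acc
    rw [Nat.toDigitsCore]
    by_cases h : m / 10 = 0
    · rw [if_pos h, pvRep, if_pos (by omega)]
      have : m % 10 = m := Nat.mod_eq_of_lt (by omega)
      rw [this]
      rfl
    · rw [if_neg h, ih _ (by omega)]
      conv_rhs => rw [pvRep]
      rw [if_neg (by omega)]
      simp

theorem pvToChars_eq (s : Int) (hs : 0 < s) : PySem.Int.toChars s = pvRep s.toNat := by
  rw [PySem.Int.toChars, if_neg (by omega), Nat.toDigits,
    pvRep_toDigitsCore _ _ (by omega), List.append_nil]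

theorem pvRep_ne_nil (m : Nat) : pvRep m ≠ [] := by
  rw [pvRep]; split <;> simp

theorem pvRep_bounds (m : Nat) (hm : 0 < m) :
    10 ^ ((pvRep m).length - 1) ≤ m ∧ m < 10 ^ (pvRep m).length := by
  induction m using Nat.strong_induction_on with
  | _ m ih =>
    rw [pvRep]
    by_cases h : m < 10
    · rw [if_pos h]; simpa using ⟨by omega, by omega⟩
    · rw [if_neg h]
      have h10 : m / 10 < m := Nat.div_lt_self (by omega) (by omega)
      obtain ⟨lo, hi⟩ := ih (m / 10) h10 (by omega)
      have hne := pvRep_ne_nil (m / 10)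
      have hlen : 1 ≤ (pvRep (m / 10)).length := by
        cases hq : pvRep (m / 10) <;> simp_all
      simp only [List.length_append, List.length_cons, List.length_nil]
      constructor
      · have : 10 ^ ((pvRep (m / 10)).length + 1 - 1) = 10 * 10 ^ ((pvRep (m / 10)).length - 1) := by
          rw [← pow_succ']
          congr 1
          omega
        rw [this]
        omega
      · have : 10 ^ ((pvRep (m / 10)).length + 1) = 10 * 10 ^ ((pvRep (m / 10)).length) := by
          rw [← pow_succ']
        rw [this]
        omega

theorem pvDigitChar_nine : ∀ d : Nat, d < 10 → (Nat.digitChar d = '9' ↔ d = 9) := by decide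

theorem pvRep_nines (m : Nat) (hm : 0 < m) :
    (∀ c ∈ pvRep m, c = '9') ↔ m = 10 ^ (pvRep m).length - 1 := by
  induction m using Nat.strong_induction_on with
  | _ m ih =>
    rw [pvRep]
    by_cases h : m < 10
    · rw [if_pos h]
      simp [pvDigitChar_nine m h]
    · rw [if_neg h]
      have h10 : m / 10 < m := Nat.div_lt_self (by omega) (by omega)
      have ihm := ih (m / 10) h10 (by omega)
      have hlen : 1 ≤ (pvRep (m / 10)).length := by
        have := pvRep_ne_nil (m / 10)
        cases hq : pvRep (m / 10) <;> simp_all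
      have hb := pvRep_bounds (m / 10) (by omega)
      simp only [List.mem_append, List.mem_singleton, List.length_append, List.length_cons,
        List.length_nil, Nat.zero_add]
      have hmod : m % 10 < 10 := by omega
      have hp : 10 ^ ((pvRep (m / 10)).length + 1) = 10 * 10 ^ ((pvRep (m / 10)).length) := by
        rw [← pow_succ']
      constructor
      · intro hall
        have h1 : m / 10 = 10 ^ (pvRep (m / 10)).length - 1 :=
          ihm.mp (fun c hc => hall c (Or.inl hc))
        have h2 : m % 10 = 9 := by
          have := hall (Nat.digitChar (m % 10)) (Or.inr rfl)
          exact (pvDigitChar_nine _ hmod).mp this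
        omega
      · intro hme c hc
        have h2 : m % 10 = 9 := by omega
        have h1 : m / 10 = 10 ^ (pvRep (m / 10)).length - 1 := by omega
        rcases hc with hc | hc
        · exact ihm.mpr h1 c hc
        · rw [hc, h2]; decide

theorem pvPowLoop_climb (s : Int) (k : Nat) (h2 : s < 10 ^ (k + 1) - 1) :
    ∀ (d j : Nat), 1 ≤ j → j + d = k → 10 ^ k - 1 ≤ s → pvPowLoop s (10 ^ j) = 10 ^ k := by
  intro d
  induction d with
  | zero =>
    intro j h1 hjk hle
    rw [pvPowLoop, dif_neg]
    · rw [show j = k by omega]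
    rw [show j = k by omega]
    push Not
    intro _
    have : (10:Int) * 10 ^ k = 10 ^ (k + 1) := by ring
    omega
  | succ d ih =>
    intro j h1 hjk hle
    rw [pvPowLoop, dif_pos]
    · rw [show (10:Int) * 10 ^ j = 10 ^ (j + 1) by ring]
      exact ih (j + 1) (by omega) (by omega) hle
    constructor
    · positivity
    · have hmono : (10:Int) ^ (j + 1) ≤ 10 ^ k := by
        apply pow_le_pow_right₀ (by norm_num) (by omega)
      have : (10:Int) * 10 ^ j = 10 ^ (j + 1) := by ring
      omega

theorem pvPowLoop_eq (s : Int) (k : Nat) (hk : 1 ≤ k)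
    (h1 : 10 ^ k - 1 ≤ s) (h2 : s < 10 ^ (k + 1) - 1) :
    pvPowLoop s 10 = 10 ^ k := by
  have := pvPowLoop_climb s k h2 (k - 1) 1 le_rfl (by omega) h1
  simpa using this

theorem pvParse : ∀ k ∈ List.range 10, ∀ i ∈ ([0,1,2,3,4,5,6,7,8] : List Int),
    PySem.Int.ofChars? (PySem.Int.toChars i ++ List.replicate k '9')
      = some (i * 10 ^ k + (10 ^ k - 1)) := by decide

theorem pvClosed_aux (n h M r : Int) (hM1 : 1 ≤ M) (hM9 : M ≤ 9) (hr0 : 0 ≤ r) (hr9 : r ≤ 9) :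
    ((([1,2,3,4,5,6,7,8,9] : List Int).filter (fun j => decide (j ≤ M))).map
      (fun j => if j ≤ r then h * j - 1 else n + 1 - h * j)).sum
    = h * ((min M r * (min M r + 1)) / 2) - min M r + (M - min M r) * (n + 1)
        - h * ((M * (M + 1)) / 2 - (min M r * (min M r + 1)) / 2) := by
  interval_cases M <;> interval_cases r <;>
    simp only [List.filter] <;> norm_num <;> omega

-- the heart of the equivalence: A's filtered-candidate accumulation equals B's closed form
theorem pvClosed (n s P : Int) (hs : s = 2 * n - 1) (h9 : 9 ≤ s)
    (hP2 : (2 : Int) ∣ P) (hP10 : 10 ≤ P) (hlo : P - 1 ≤ s) (hhi : s < 10 * P - 1) :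
    (((PySem.List.pyRange 1 10).filter (fun j => decide (j * P - 1 ≤ s))).map
      (fun j => if j * P - 1 ≤ n + 1 then PySem.Int.floordiv (j * P - 1) 2
                else PySem.Int.floordiv (n - (j * P - 1 - n) + 1) 2)).sum
    = PySem.Int.floordiv P 2 * PySem.Int.floordiv
          (min (PySem.Int.floordiv (s + 1) P) (PySem.Int.floordiv (n + 2) P) *
            (min (PySem.Int.floordiv (s + 1) P) (PySem.Int.floordiv (n + 2) P) + 1)) 2
        - min (PySem.Int.floordiv (s + 1) P) (PySem.Int.floordiv (n + 2) P)
        + (PySem.Int.floordiv (s + 1) P -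
            min (PySem.Int.floordiv (s + 1) P) (PySem.Int.floordiv (n + 2) P)) * (n + 1)
        - PySem.Int.floordiv P 2 *
            (PySem.Int.floordiv (PySem.Int.floordiv (s + 1) P *
                (PySem.Int.floordiv (s + 1) P + 1)) 2
              - PySem.Int.floordiv
                  (min (PySem.Int.floordiv (s + 1) P) (PySem.Int.floordiv (n + 2) P) *
                    (min (PySem.Int.floordiv (s + 1) P) (PySem.Int.floordiv (n + 2) P) + 1)) 2) := by

  obtain ⟨h, rfl⟩ := hP2
  have hh5 : (5 : Int) ≤ h := by omega
  have hPpos : (0 : Int) < 2 * h := by omega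
  have hfdP : ∀ a : Int, PySem.Int.floordiv a (2 * h) = a / (2 * h) :=
    fun a => PySem.Int.floordiv_eq_ediv_of_pos hPpos
  have hfd2 : ∀ a : Int, PySem.Int.floordiv a 2 = a / 2 :=
    fun a => PySem.Int.floordiv_eq_ediv_of_pos (by norm_num)
  simp only [hfdP, hfd2]
  obtain ⟨M, hMdef⟩ : ∃ M : Int, (s + 1) / (2 * h) = M := ⟨_, rfl⟩
  obtain ⟨q, hqdef⟩ : ∃ q : Int, (n + 2) / (2 * h) = q := ⟨_, rfl⟩
  rw [hMdef, hqdef]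
  have hM1 : 1 ≤ M := by
    rw [← hMdef]
    exact (Int.le_ediv_iff_mul_le hPpos).mpr (by linarith)
  have hM9 : M ≤ 9 := by
    by_contra hc
    have h10 : (10 : Int) ≤ (s + 1) / (2 * h) := by rw [hMdef]; omega
    have := (Int.le_ediv_iff_mul_le hPpos).mp h10
    linarith
  have hq0 : 0 ≤ q := by
    rw [← hqdef]
    exact Int.ediv_nonneg (by linarith) (by linarith)
  obtain ⟨r, hrdef⟩ : ∃ r : Int, min q 9 = r := ⟨_, rfl⟩
  have hr0 : 0 ≤ r := by omega
  have hr9 : r ≤ 9 := by omega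
  have hminMq : min M q = min M r := by omega
  rw [hminMq]
  have hcondM : ∀ j : Int, (decide (j * (2 * h) - 1 ≤ s) = decide (j ≤ M)) := by
    intro j
    simp only [decide_eq_decide]
    rw [← hMdef]
    constructor
    · intro hj
      exact (Int.le_ediv_iff_mul_le hPpos).mpr (by linarith)
    · intro hj
      have := (Int.le_ediv_iff_mul_le hPpos).mp hj
      linarith
  have hcondq : ∀ j : Int, (2 * (h * j) - 1 ≤ n + 1 ↔ j ≤ q) := by
    intro j
    rw [← hqdef]
    constructor
    · intro hj
      exact (Int.le_ediv_iff_mul_le hPpos).mpr (by linarith)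
    · intro hj
      have := (Int.le_ediv_iff_mul_le hPpos).mp hj
      linarith
  rw [show PySem.List.pyRange 1 10 = [1,2,3,4,5,6,7,8,9] from by decide]
  rw [List.filter_congr (fun x _ => hcondM x)]
  have hterm : ∀ j ∈ ([1,2,3,4,5,6,7,8,9] : List Int).filter (fun j => decide (j ≤ M)),
      (if j * (2 * h) - 1 ≤ n + 1 then (j * (2 * h) - 1) / 2
        else (n - (j * (2 * h) - 1 - n) + 1) / 2)
      = (if j ≤ r then h * j - 1 else n + 1 - h * j) := by
    intro j hj
    have hj9 : j ∈ ([1,2,3,4,5,6,7,8,9] : List Int) := (List.mem_filter.mp hj).1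
    have hj1 : 1 ≤ j ∧ j ≤ 9 := by fin_cases hj9 <;> norm_num
    have hq := hcondq j
    rw [show j * (2 * h) = 2 * (h * j) from by ring]
    generalize h * j = x at hq ⊢
    by_cases hcq : j ≤ q
    · rw [if_pos (hq.mpr hcq), if_pos (by omega : j ≤ r)]
      omega
    · rw [if_neg (fun hcon => hcq (hq.mp hcon)), if_neg (by omega : ¬ j ≤ r)]
      omega
  rw [List.map_congr_left hterm]
  rw [show (2 * h) / 2 = h from by omega]
  exact pvClosed_aux n h M r hM1 hM9 hr0 hr9

-- ===== VERDICT (by name: the statement is the Claim_ definition above) =====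
theorem shovel_sale_spec : Claim_equal_shovel_sale := by
  intro n hDom
  have hdom : -2147483648 ≤ n ∧ n ≤ 2147483648 := by
    simpa [Dom_shovel_sale, pvDomInt] using hDom
  show shovel_sale n = shovel_sale_alt n
  simp only [shovel_sale, shovel_sale_alt]
  rw [show n + (n - 1) = 2 * n - 1 from by ring]
  by_cases hlt : 2 * n - 1 < 9
  · rw [if_pos hlt, if_pos hlt]
  rw [if_neg hlt, if_neg hlt]
  push Not at hlt
  set s : Int := 2 * n - 1 with hsdef
  set m : Nat := s.toNat with hmdef
  have hcast : (m : Int) = s := Int.toNat_of_nonneg (by omega)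
  have hm9 : 9 ≤ m := by omega
  obtain ⟨hblo, hbhi⟩ := pvRep_bounds m (by omega)
  set L : Nat := (pvRep m).length with hLdef
  have hL1 : 1 ≤ L := by
    have := pvRep_ne_nil m
    rw [hLdef]
    cases h : pvRep m <;> simp_all
  have hpowcast : ∀ j : Nat, ((10 ^ j : Nat) : Int) = (10 : Int) ^ j := by
    intro j; push_cast; ring
  have hlo : (10 : Int) ^ (L - 1) ≤ s := by
    have := hpowcast (L - 1); omega
  have hhi : s < (10 : Int) ^ L := by
    have := hpowcast L; omega
  have hmbig : m < 10 ^ 10 := by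
    have h1010 : (10 : Nat) ^ 10 = 10000000000 := by norm_num
    omega
  have hL10 : L ≤ 10 := by
    by_contra hc
    have : 10 ^ 10 ≤ 10 ^ (L - 1) := Nat.pow_le_pow_right (by omega) (by omega)
    omega
  have hchars : PySem.Int.toChars s = pvRep m := pvToChars_eq s (by omega)
  have hbool : (PySem.Set.issubset (PySem.Set.ofList (PySem.Int.toChars s))
      (PySem.Set.ofList ['9']) = true) ↔ s = (10 : Int) ^ L - 1 := by
    rw [hchars, PySem.Set.issubset_iff]
    have hmem : (∀ x ∈ PySem.Set.ofList (pvRep m), x ∈ PySem.Set.ofList ['9'])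
        ↔ ∀ c ∈ pvRep m, c = '9' := by
      constructor
      · intro h c hc
        have := h c ((PySem.Set.mem_ofList _ _).mpr hc)
        simpa [PySem.Set.ofList] using (PySem.Set.mem_ofList _ _).mp this
      · intro h x hx
        have := h x ((PySem.Set.mem_ofList _ _).mp hx)
        apply (PySem.Set.mem_ofList _ _).mpr
        simp [this]
    rw [hmem, pvRep_nines m (by omega), ← hLdef]
    have := hpowcast L
    omega
  by_cases hnine : s = (10 : Int) ^ L - 1
  · -- all-nines: A returns 1, B's closed form evaluates to 1
    rw [if_pos (hbool.mpr hnine)]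
    have hPL : (10 : Int) ≤ 10 ^ L := by
      calc (10 : Int) = 10 ^ 1 := by norm_num
      _ ≤ 10 ^ L := pow_le_pow_right₀ (by norm_num) hL1
    have hpow : pvPowLoop s 10 = 10 ^ L := by
      apply pvPowLoop_eq s L hL1 (by omega)
      have : (10 : Int) ^ (L + 1) = 10 * 10 ^ L := by ring
      omega
    rw [hpow]
    set P : Int := (10 : Int) ^ L with hPdef
    have hPs : P = s + 1 := by omega
    have hPpos : (0 : Int) < P := by omega
    have hfdP : ∀ a : Int, PySem.Int.floordiv a P = a / P :=
      fun a => PySem.Int.floordiv_eq_ediv_of_pos hPpos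
    have hfd2 : ∀ a : Int, PySem.Int.floordiv a 2 = a / 2 :=
      fun a => PySem.Int.floordiv_eq_ediv_of_pos (by norm_num)
    simp only [hfdP, hfd2]
    have hm1 : (s + 1) / P = 1 := by rw [hPs]; exact Int.ediv_self (by omega)
    have hq0 : (n + 2) / P = 0 := Int.ediv_eq_zero_of_lt (by omega) (by omega)
    have hh : P / 2 = n := by omega
    rw [hm1, hq0, hh]
    norm_num
  · -- not all nines: A's candidate accumulation equals B's closed form
    rw [if_neg (by rw [hbool]; exact hnine)]
    have hL2 : 2 ≤ L := by
      by_contra hc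
      have hL : L = 1 := by omega
      rw [hL] at hhi hnine
      norm_num at hhi hnine
      omega
    set k : Nat := L - 1 with hkdef
    have hk1 : 1 ≤ k := by omega
    set P : Int := (10 : Int) ^ k with hPdef
    have hP10 : (10 : Int) ≤ P := by
      calc (10 : Int) = 10 ^ 1 := by norm_num
      _ ≤ 10 ^ k := pow_le_pow_right₀ (by norm_num) hk1
    have hPL : (10 : Int) * P = 10 ^ L := by
      rw [hPdef, ← pow_succ']
      congr 1
      omega
    have hsP : s < 10 * P - 1 := by omega
    rw [hchars, PySem.List.len_eq, ← hLdef, PySem.List.pyRepeat_singleton,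
      show ((L : Int) - 1).toNat = k from by omega,
      show PySem.List.pyRange 0 9 = [0,1,2,3,4,5,6,7,8] from by decide]
    have hmap : ([0,1,2,3,4,5,6,7,8] : List Int).map
        (fun i => (PySem.Int.ofChars? (PySem.Int.toChars i ++ List.replicate k '9')).getD 0)
        = (PySem.List.pyRange 1 10).map (fun j => j * P - 1) := by
      rw [show PySem.List.pyRange 1 10 = [1,2,3,4,5,6,7,8,9] from by decide]
      have hstep : ∀ i ∈ ([0,1,2,3,4,5,6,7,8] : List Int),
          (PySem.Int.ofChars? (PySem.Int.toChars i ++ List.replicate k '9')).getD 0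
            = i * P + (P - 1) := by
        intro i hi
        rw [pvParse k (by simp [List.mem_range]; omega) i hi]
        rfl
      rw [List.map_congr_left hstep]
      simp only [List.map_cons, List.map_nil, List.cons.injEq, and_true]
      refine ⟨by ring, by ring, by ring, by ring, by ring, by ring, by ring, by ring, by ring⟩
    rw [hmap, List.filter_map]
    rw [show (fun (pairs p : Int) => if p ≤ n + 1 then pairs + PySem.Int.floordiv p 2
          else pairs + PySem.Int.floordiv (n - (p - n) + 1) 2)
        = (fun (pairs p : Int) => pairs + (if p ≤ n + 1 then PySem.Int.floordiv p 2
          else PySem.Int.floordiv (n - (p - n) + 1) 2)) from by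
      funext a b; split <;> rfl]
    rw [PySem.List.foldl_add]
    rw [zero_add]
    rw [List.map_map]
    simp only [Function.comp_def]
    have hpow : pvPowLoop s 10 = P := by
      apply pvPowLoop_eq s k hk1 (by omega)
      have : (10 : Int) ^ (k + 1) = 10 * P := by rw [hPdef]; ring
      omega
    rw [hpow]
    have h2P : (2 : Int) ∣ P := by
      rw [hPdef]
      exact dvd_trans (by norm_num) (dvd_pow_self 10 (by omega))
    exact pvClosed n s P hsdef (by omega) h2P hP10 (by omega) hsP
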